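-- pv_equiv track=rewrite | github.com/abhishek25dh/exp-pipeline | layout_1_step_2.py | segment_sizes
-- ===== SOURCE A (Python) =====
-- def segment_sizes(length: int, slots: int):
--     if slots <= 0:
--         return []
--     base = length // slots
--     rem = length % slots
--     out = []
--     for i in range(slots):
--         out.append(base + (1 if i < rem else 0))
--     return out
-- ===== SOURCE B (Python) =====
-- def segment_sizes(length: int, slots: int):
--     # Greedy peeling: repeatedly carve off the ceiling of what remains over the
--     # remaining slot count; no base/remainder is ever computed.
--     out = []
--     remaining = length
--     k = slots
--     while k > 0:
--         first = -((-remaining) // k)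
--         out.append(first)
--         remaining -= first
--         k -= 1
--     return out
-- ===== Notes on version B (the rewrite author's own statement) =====
-- stated objective: alternative
-- what changed: Replaces the one-shot divmod plus per-index branch with a greedy peeling loop that at each step takes the ceiling of the remaining length over the remaining slot count and subtracts it, computing no base/remainder at all.
import Mathlib
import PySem

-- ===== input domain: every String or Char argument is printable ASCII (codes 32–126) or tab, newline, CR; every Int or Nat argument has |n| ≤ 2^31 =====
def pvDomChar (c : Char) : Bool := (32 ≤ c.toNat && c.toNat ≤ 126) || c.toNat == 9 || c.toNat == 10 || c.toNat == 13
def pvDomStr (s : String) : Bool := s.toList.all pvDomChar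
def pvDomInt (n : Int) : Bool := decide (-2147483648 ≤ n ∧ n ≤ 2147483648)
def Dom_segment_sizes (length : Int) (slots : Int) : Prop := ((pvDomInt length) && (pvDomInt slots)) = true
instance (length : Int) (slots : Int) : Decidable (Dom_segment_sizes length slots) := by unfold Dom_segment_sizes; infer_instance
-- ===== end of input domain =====

-- ===== PORT A =====
def segment_sizes (length : Int) (slots : Int) : List Int :=
  if slots ≤ 0 then []
  else
    let base := PySem.Int.floordiv length slots
    let rem := PySem.Int.mod length slots
    (PySem.List.pyRange 0 slots 1).foldl
      (fun out i => out ++ [base + (if i < rem then 1 else 0)]) []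

-- ===== PORT B =====
-- B: greedy peeling — each step takes ceil(remaining / remaining slot count); simpler decomposition, same values.
-- The while loop 'k = slots; while k > 0: … k -= 1' runs slots.toNat times with k = slots, slots-1, …, 1.
def ssLoop (remaining : Int) (k : Nat) : List Int :=
  match k with
  | 0 => []
  | m + 1 =>
    let first := -(PySem.Int.floordiv (-remaining) ((m : Int) + 1))
    first :: ssLoop (remaining - first) m

def segment_sizes_alt (length : Int) (slots : Int) : List Int :=
  ssLoop length slots.toNat

-- ===== PRECONDITION & SPEC =====
def Spec_segment_sizes (length : Int) (slots : Int) (out : List Int) : Prop := out = segment_sizes_alt length slots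
instance (length : Int) (slots : Int) (out : List Int) : Decidable (Spec_segment_sizes length slots out) := by unfold Spec_segment_sizes; infer_instance

-- ===== CLAIM (what is proved, stated in full; the proofs are below) =====
def Claim_equal_segment_sizes : Prop := ∀ (length : Int) (slots : Int), Dom_segment_sizes length slots → Spec_segment_sizes length slots (segment_sizes length slots)

-- ===== LEMMAS AND PROOFS =====

-- A's per-index branch, when the whole range lies below rem
lemma map_ite_all (n : Nat) (b rem : Int) (h : (n : Int) ≤ rem) :
    (List.range n).map (fun k : Nat => b + (if (k : Int) < rem then 1 else 0)) =
      List.replicate n (b + 1) := by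
  induction n with
  | zero => simp
  | succ m ih =>
    rw [List.range_succ, List.map_append, ih (by exact_mod_cast le_trans (by exact_mod_cast Nat.le_succ m) h)]
    have : ((m : Int) < rem) := by exact_mod_cast lt_of_lt_of_le (by exact_mod_cast Nat.lt_succ_self m) h
    simp [this, List.replicate_succ']

-- A's output as two replicated runs
lemma map_ite_split (n : Nat) (b rem : Int) (h0 : 0 ≤ rem) (h1 : rem ≤ (n : Int)) :
    (List.range n).map (fun k : Nat => b + (if (k : Int) < rem then 1 else 0)) =
      List.replicate rem.toNat (b + 1) ++ List.replicate (n - rem.toNat) b := by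
  induction n with
  | zero =>
    have : rem = 0 := le_antisymm (by exact_mod_cast h1) h0
    simp [this]
  | succ m ih =>
    rw [List.range_succ, List.map_append]
    rcases (by omega : rem ≤ (m : Int) ∨ (m : Int) < rem) with hle | hgt
    · rw [ih hle]
      have hnm : ¬ ((m : Int) < rem) := not_lt.mpr hle
      simp [hnm, List.append_assoc]
      rw [← List.replicate_succ']
      congr 1
      omega
    · have heq : rem = (m : Int) + 1 := by omega
      rw [map_ite_all m b rem (by omega)]
      simp [heq, List.replicate_succ']

-- ceiling division ⌈L/s⌉ for 0 < s, written on L = b*s + r with 0 ≤ r < s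
lemma ceil_step (b : Int) (s : Int) (r : Int) (hs : 0 < s) (h0 : 0 ≤ r) (h1 : r ≤ s) :
    -(PySem.Int.floordiv (-(b * s + r)) s) = b + (if 0 < r then 1 else 0) := by
  rw [PySem.Int.neg_floordiv_neg_eq_iff_of_pos hs]
  split_ifs with hr
  · constructor <;> nlinarith
  · constructor <;> nlinarith

-- B's peel loop on L = b*m + r produces the same two runs
lemma ssLoop_split (m : Nat) (b : Int) (r : Nat) (hr : r ≤ m) :
    ssLoop (b * m + r) m = List.replicate r (b + 1) ++ List.replicate (m - r) b := by
  induction m generalizing b r with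
  | zero =>
    have : r = 0 := Nat.le_zero.mp hr
    simp [this, ssLoop]
  | succ n ih =>
    rw [ssLoop]
    have hstep := ceil_step b (n + 1 : Nat) r (by exact_mod_cast Nat.succ_pos n)
      (by exact_mod_cast Nat.zero_le r) (by exact_mod_cast hr)
    push_cast at hstep ⊢
    rw [hstep]
    rcases Nat.eq_zero_or_pos r with h0 | hpos
    · subst h0
      simp only [Nat.cast_zero, add_zero, lt_irrefl, if_false]
      have harg : b * ((n : Int) + 1) - b = b * (n : Nat) + ((0 : Nat) : Int) := by push_cast; ring
      rw [harg, ih b 0 (Nat.zero_le n)]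
      rfl
    · obtain ⟨t, rfl⟩ : ∃ t, r = t + 1 := ⟨r - 1, by omega⟩
      have hposI : (0 : Int) < ((t : Int) + 1) := by positivity
      push_cast
      rw [if_pos hposI]
      have harg : b * ((n : Int) + 1) + ((t : Int) + 1) - (b + 1) = b * (n : Nat) + ((t : Nat) : Int) := by
        ring
      rw [harg, ih b t (by omega), List.replicate_succ, List.cons_append]

-- ===== VERDICT (by name: the statement is the Claim_ definition above) =====
theorem segment_sizes_spec : Claim_equal_segment_sizes := by
  intro length slots _
  unfold Spec_segment_sizes segment_sizes segment_sizes_alt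
  by_cases h : slots ≤ 0
  · have : slots.toNat = 0 := by omega
    simp [h, this, ssLoop]
  · simp only [h, if_false]
    have hpos : 0 < slots := by omega
    have h0 : 0 ≤ PySem.Int.mod length slots := PySem.Int.mod_nonneg length hpos
    have h1 : PySem.Int.mod length slots < slots := PySem.Int.mod_lt length hpos
    rw [PySem.List.foldl_append_singleton_eq_map, PySem.List.pyRange_one]
    simp only [sub_zero, zero_add, List.nil_append, List.map_map, Function.comp_def]
    rw [map_ite_split slots.toNat _ _ h0 (by omega)]
    have c1 : ((slots.toNat : Nat) : Int) = slots := by omega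
    have c2 : (((PySem.Int.mod length slots).toNat : Nat) : Int) = PySem.Int.mod length slots := by omega
    have hlen : length = PySem.Int.floordiv length slots * ((slots.toNat : Nat) : Int) +
        (((PySem.Int.mod length slots).toNat : Nat) : Int) := by
      have h2 := PySem.Int.floordiv_mul_add_mod length slots
      rw [c1, c2]
      linarith [h2]
    rw [show ssLoop length slots.toNat =
        ssLoop (PySem.Int.floordiv length slots * ((slots.toNat : Nat) : Int) + (((PySem.Int.mod length slots).toNat : Nat) : Int)) slots.toNat by rw [← hlen],
      ssLoop_split slots.toNat _ _ (by omega)]
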